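-- pv_equiv track=rewrite | github.com/alex-caparros/Yahtzee-Bingo | yahtzee_bingo.py | is_small_straight
-- ===== SOURCE A (Python) =====
-- def is_small_straight(dice):
--     unique_sorted = sorted(set(dice))
--     if len(unique_sorted) < 4:
--         return False
--
--     for i in range(len(unique_sorted) - 3):
--         if (unique_sorted[i] + 1 == unique_sorted[i+1] and
--             unique_sorted[i+1] + 1 == unique_sorted[i+2] and
--             unique_sorted[i+2] + 1 == unique_sorted[i+3]):
--             return True
--     return False
-- ===== SOURCE B (Python) =====
-- def is_small_straight(dice):
--     s = set(dice)
--     if len(s) < 4: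
--         return False
--     for v in s:
--         if v + 1 in s and v + 2 in s and v + 3 in s:
--             return True
--     return False
-- ===== Notes on version B (the rewrite author's own statement) =====
-- stated objective: simpler
-- what changed: Drops the sort entirely: instead of sorting the distinct values and scanning adjacent quadruples, B probes the set directly for v+1, v+2, v+3 from each distinct value v.
import Mathlib
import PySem

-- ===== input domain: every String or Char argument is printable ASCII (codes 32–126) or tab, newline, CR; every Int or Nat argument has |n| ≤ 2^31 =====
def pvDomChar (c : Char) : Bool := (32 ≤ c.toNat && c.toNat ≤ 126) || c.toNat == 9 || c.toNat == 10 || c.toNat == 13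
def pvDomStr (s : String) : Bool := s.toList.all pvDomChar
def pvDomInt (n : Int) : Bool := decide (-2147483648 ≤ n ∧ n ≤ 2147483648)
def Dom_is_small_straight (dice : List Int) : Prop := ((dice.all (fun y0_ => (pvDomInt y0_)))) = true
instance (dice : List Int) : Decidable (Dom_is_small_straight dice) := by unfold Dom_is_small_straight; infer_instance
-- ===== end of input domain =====

-- B replaces A's sort-then-adjacent-scan by direct membership probing (v+1,v+2,v+3) in the set of dice: simpler, no sort.
-- ===== PORT A =====
def is_small_straight (dice : List Int) : Bool :=
  let unique_sorted := PySem.List.sorted (PySem.Set.ofList dice) (fun x => x) false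
  if unique_sorted.length < 4 then false
  else
    (PySem.List.pyRange 0 ((unique_sorted.length : Int) - 3)).any (fun i =>
      PySem.List.pyGetD unique_sorted i 0 + 1 == PySem.List.pyGetD unique_sorted (i+1) 0 &&
      PySem.List.pyGetD unique_sorted (i+1) 0 + 1 == PySem.List.pyGetD unique_sorted (i+2) 0 &&
      PySem.List.pyGetD unique_sorted (i+2) 0 + 1 == PySem.List.pyGetD unique_sorted (i+3) 0)

-- ===== PORT B =====
def is_small_straight_alt (dice : List Int) : Bool :=
  let s : PySem.Set Int := PySem.Set.ofList dice
  if s.length < 4 then false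
  else s.any (fun v => s.contains (v+1) && s.contains (v+2) && s.contains (v+3))

-- ===== PRECONDITION & SPEC =====
def Spec_is_small_straight (dice : List Int) (out : Bool) : Prop := out = is_small_straight_alt dice
instance (dice : List Int) (out : Bool) : Decidable (Spec_is_small_straight dice out) := by unfold Spec_is_small_straight; infer_instance

-- ===== CLAIM (what is proved, stated in full; the proofs are below) =====
def Claim_equal_is_small_straight : Prop := ∀ (dice : List Int), Dom_is_small_straight dice → Spec_is_small_straight dice (is_small_straight dice)

-- ===== LEMMAS AND PROOFS =====

-- ===== VERDICT (by name: the statement is the Claim_ definition above) =====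
-- the common semantic content: dice contain four consecutive values
def HasRun (dice : List Int) : Prop :=
  ∃ v, v ∈ dice ∧ v + 1 ∈ dice ∧ v + 2 ∈ dice ∧ v + 3 ∈ dice

lemma us_strict (dice : List Int) :
    (PySem.List.sorted (PySem.Set.ofList dice) (fun x => x) false).Pairwise (· < ·) :=
  PySem.List.sorted_ofList_pairwise_lt dice

lemma us_mem (dice : List Int) (x : Int) :
    x ∈ PySem.List.sorted (PySem.Set.ofList dice) (fun x => x) false ↔ x ∈ dice := by
  rw [PySem.List.mem_sorted, PySem.Set.mem_ofList]

-- in a strictly increasing Int list, a and a+1 sit at consecutive indices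
lemma succ_index {l : List Int} (hl : l.Pairwise (· < ·)) {i j : Nat}
    (hi : i < l.length) (hj : j < l.length) (h : l[i] + 1 = l[j]) : j = i + 1 := by
  have mono : ∀ p q (hp : p < l.length) (hq : q < l.length), p < q → l[p] < l[q] := by
    intro p q hp hq hpq
    exact List.pairwise_iff_getElem.mp hl p q hp hq hpq
  rcases Nat.lt_trichotomy j (i+1) with hlt | heq | hgt
  · rcases Nat.lt_or_ge j i with h2 | h2
    · have := mono j i hj hi h2; omega
    · have hji : j = i := Nat.le_antisymm (Nat.lt_succ_iff.mp hlt) h2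
      subst hji; omega
  · exact heq
  · have h1 : i + 1 < l.length := Nat.lt_trans hgt hj
    have ha := mono i (i+1) hi h1 (Nat.lt_succ_self i)
    have hb := mono (i+1) j h1 hj hgt
    omega

-- a run v..v+3 in dice appears at four consecutive indices of sorted(set(dice))
lemma run_index (dice : List Int) (h : HasRun dice) :
    ∃ i : Nat, i + 3 < (PySem.List.sorted (PySem.Set.ofList dice) (fun x => x) false).length ∧
      (PySem.List.sorted (PySem.Set.ofList dice) (fun x => x) false).getD i 0 + 1 =
        (PySem.List.sorted (PySem.Set.ofList dice) (fun x => x) false).getD (i+1) 0 ∧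
      (PySem.List.sorted (PySem.Set.ofList dice) (fun x => x) false).getD (i+1) 0 + 1 =
        (PySem.List.sorted (PySem.Set.ofList dice) (fun x => x) false).getD (i+2) 0 ∧
      (PySem.List.sorted (PySem.Set.ofList dice) (fun x => x) false).getD (i+2) 0 + 1 =
        (PySem.List.sorted (PySem.Set.ofList dice) (fun x => x) false).getD (i+3) 0 := by
  obtain ⟨v, h0, h1, h2, h3⟩ := h
  rw [← us_mem dice] at h0 h1 h2 h3
  obtain ⟨i0, hi0, e0⟩ := List.mem_iff_getElem.mp h0
  obtain ⟨i1, hi1, e1⟩ := List.mem_iff_getElem.mp h1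
  obtain ⟨i2, hi2, e2⟩ := List.mem_iff_getElem.mp h2
  obtain ⟨i3, hi3, e3⟩ := List.mem_iff_getElem.mp h3
  have hl := us_strict dice
  have q1 : i1 = i0 + 1 := succ_index hl hi0 hi1 (by rw [e0, e1])
  have q2 : i2 = i1 + 1 := succ_index hl hi1 hi2 (by rw [e1, e2]; ring)
  have q3 : i3 = i2 + 1 := succ_index hl hi2 hi3 (by rw [e2, e3]; ring)
  have d0 : (PySem.List.sorted (PySem.Set.ofList dice) (fun x => x) false).getD i0 0 = v := by
    rw [List.getD_eq_getElem _ _ hi0]; exact e0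
  have d1 : (PySem.List.sorted (PySem.Set.ofList dice) (fun x => x) false).getD i1 0 = v + 1 := by
    rw [List.getD_eq_getElem _ _ hi1]; exact e1
  have d2 : (PySem.List.sorted (PySem.Set.ofList dice) (fun x => x) false).getD i2 0 = v + 2 := by
    rw [List.getD_eq_getElem _ _ hi2]; exact e2
  have d3 : (PySem.List.sorted (PySem.Set.ofList dice) (fun x => x) false).getD i3 0 = v + 3 := by
    rw [List.getD_eq_getElem _ _ hi3]; exact e3
  have q2' : i2 = i0 + 2 := by omega
  have q3' : i3 = i0 + 3 := by omega
  rw [q1] at d1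
  rw [q2'] at d2
  rw [q3'] at d3
  exact ⟨i0, by omega, by rw [d0, d1], by rw [d1, d2]; ring, by rw [d2, d3]; ring⟩

lemma A_true_iff (dice : List Int) : is_small_straight dice = true ↔ HasRun dice := by
  unfold is_small_straight
  by_cases hlen : (PySem.List.sorted (PySem.Set.ofList dice) (fun x => x) false).length < 4
  · simp only [if_pos hlen, Bool.false_eq_true, false_iff]
    intro h
    obtain ⟨i, hi, _⟩ := run_index dice h
    omega
  · rw [if_neg hlen, List.any_eq_true]
    constructor
    · rintro ⟨x, hx, hp⟩
      rw [PySem.List.mem_pyRange_one] at hx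
      obtain ⟨hx0, hx1⟩ := hx
      simp only [Bool.and_eq_true, beq_iff_eq,
        PySem.List.pyGetD_of_nonneg _ (0:Int) (hx0 : (0:Int) ≤ x),
        PySem.List.pyGetD_of_nonneg _ (0:Int) (by omega : (0:Int) ≤ x + 1),
        PySem.List.pyGetD_of_nonneg _ (0:Int) (by omega : (0:Int) ≤ x + 2),
        PySem.List.pyGetD_of_nonneg _ (0:Int) (by omega : (0:Int) ≤ x + 3)] at hp
      have t1 : (x+1).toNat = x.toNat + 1 := by omega
      have t2 : (x+2).toNat = x.toNat + 2 := by omega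
      have t3 : (x+3).toNat = x.toNat + 3 := by omega
      rw [t1, t2, t3] at hp
      obtain ⟨⟨p1, p2⟩, p3⟩ := hp
      have m : ∀ k, k < (PySem.List.sorted (PySem.Set.ofList dice) (fun x => x) false).length →
          (PySem.List.sorted (PySem.Set.ofList dice) (fun x => x) false).getD k 0 ∈ dice := by
        intro k hk
        rw [← us_mem dice, List.getD_eq_getElem _ _ hk]
        exact List.getElem_mem hk
      have hb : x.toNat + 3 < (PySem.List.sorted (PySem.Set.ofList dice) (fun x => x) false).length := by
        omega
      refine ⟨(PySem.List.sorted (PySem.Set.ofList dice) (fun x => x) false).getD x.toNat 0,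
        m _ (by omega), ?_, ?_, ?_⟩
      · rw [p1]; exact m _ (by omega)
      · have e : (PySem.List.sorted (PySem.Set.ofList dice) (fun x => x) false).getD x.toNat 0 + 2 =
            (PySem.List.sorted (PySem.Set.ofList dice) (fun x => x) false).getD (x.toNat + 2) 0 := by omega
        rw [e]; exact m _ (by omega)
      · have e : (PySem.List.sorted (PySem.Set.ofList dice) (fun x => x) false).getD x.toNat 0 + 3 =
            (PySem.List.sorted (PySem.Set.ofList dice) (fun x => x) false).getD (x.toNat + 3) 0 := by omega
        rw [e]; exact m _ hb
    · intro h
      obtain ⟨i, hi, q1, q2, q3⟩ := run_index dice h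
      refine ⟨(i : Int), ?_, ?_⟩
      · rw [PySem.List.mem_pyRange_one]; omega
      · simp only [Bool.and_eq_true, beq_iff_eq,
          PySem.List.pyGetD_of_nonneg _ (0:Int) (by positivity : (0:Int) ≤ (i:Int)),
          PySem.List.pyGetD_of_nonneg _ (0:Int) (by positivity : (0:Int) ≤ (i:Int) + 1),
          PySem.List.pyGetD_of_nonneg _ (0:Int) (by positivity : (0:Int) ≤ (i:Int) + 2),
          PySem.List.pyGetD_of_nonneg _ (0:Int) (by positivity : (0:Int) ≤ (i:Int) + 3)]
        have t0 : ((i:Int)).toNat = i := by omega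
        have t1 : ((i:Int)+1).toNat = i + 1 := by omega
        have t2 : ((i:Int)+2).toNat = i + 2 := by omega
        have t3 : ((i:Int)+3).toNat = i + 3 := by omega
        rw [t0, t1, t2, t3]
        exact ⟨⟨q1, q2⟩, q3⟩

lemma B_true_iff (dice : List Int) : is_small_straight_alt dice = true ↔ HasRun dice := by
  unfold is_small_straight_alt
  by_cases hlen : (PySem.Set.ofList dice).length < 4
  · simp only [if_pos hlen, Bool.false_eq_true, false_iff]
    intro h
    obtain ⟨i, hi, _⟩ := run_index dice h
    rw [PySem.List.length_sorted] at hi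
    omega
  · rw [if_neg hlen, List.any_eq_true]
    unfold HasRun
    constructor
    · rintro ⟨v, hv, hp⟩
      simp only [Bool.and_eq_true] at hp
      exact ⟨v, (PySem.Set.mem_ofList dice v).mp hv,
        (PySem.Set.mem_ofList dice _).mp (List.contains_iff_mem.mp hp.1.1),
        (PySem.Set.mem_ofList dice _).mp (List.contains_iff_mem.mp hp.1.2),
        (PySem.Set.mem_ofList dice _).mp (List.contains_iff_mem.mp hp.2)⟩
    · rintro ⟨v, hv, h1, h2, h3⟩
      refine ⟨v, (PySem.Set.mem_ofList dice v).mpr hv, ?_⟩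
      simp only [Bool.and_eq_true]
      exact ⟨⟨List.contains_iff_mem.mpr ((PySem.Set.mem_ofList dice _).mpr h1),
        List.contains_iff_mem.mpr ((PySem.Set.mem_ofList dice _).mpr h2)⟩,
        List.contains_iff_mem.mpr ((PySem.Set.mem_ofList dice _).mpr h3)⟩

theorem is_small_straight_spec : Claim_equal_is_small_straight := by
  intro dice _
  unfold Spec_is_small_straight
  cases hA : is_small_straight dice <;> cases hB : is_small_straight_alt dice <;> try rfl
  · exact absurd (hA ▸ (A_true_iff dice).mpr ((B_true_iff dice).mp hB)) (by simp)
  · exact absurd (hB ▸ (B_true_iff dice).mpr ((A_true_iff dice).mp hA)) (by simp)
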